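-- pv_equiv track=rewrite | github.com/AndrewADev/recipe-insights | src/recipe_board/core/sample_recipes.py | create_recipe_preview
-- ===== SOURCE A (Python) =====
-- def create_recipe_preview(recipe_text: str, max_lines: int = 8) -> str:
--     """
--     Create a preview of the recipe showing ingredients and first few steps.
--
--     Args:
--         recipe_text: Full recipe text content.
--         max_lines: Maximum number of lines to include in preview.
--
--     Returns:
--         Truncated preview text with "..." if truncated.
--     """
--     if not recipe_text:
--         return ""
--
--     lines = recipe_text.strip().split("\n")
--     preview_lines = []
--     line_count = 0
--
--     for line in lines:
--         if line_count >= max_lines: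
--             preview_lines.append("...")
--             break
--
--         # Skip empty lines at start
--         if not preview_lines and not line.strip():
--             continue
--
--         preview_lines.append(line)
--         line_count += 1
--
--     return "\n".join(preview_lines)
-- ===== SOURCE B (Python) =====
-- def create_recipe_preview(recipe_text: str, max_lines: int = 8) -> str:
--     """Preview = first max_lines lines of the stripped text, '...' appended when truncated."""
--     stripped = recipe_text.strip()
--     if not stripped:
--         return ""
--     content = stripped.split("\n")
--     preview = content[:max(max_lines, 0)]
--     if len(content) > max_lines:
--         preview.append("...")
--     return "\n".join(preview)
-- ===== Notes on version B (the rewrite author's own statement) =====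
-- stated objective: simpler
-- what changed: Replaces A's per-line counting loop (with its skip-leading-blanks and truncate bookkeeping) by a direct slice of the split lines plus a single length test for the '...' marker.
-- intended difference: On whitespace-only non-empty recipe_text with max_lines <= 0, A returns '...' (a truncation marker with no content), while B returns '' as it does for every other whitespace-only text; the empty preview is the intended value. — e.g. on create_recipe_preview(" ", 0): A returns "...", B returns ""
import Mathlib
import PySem

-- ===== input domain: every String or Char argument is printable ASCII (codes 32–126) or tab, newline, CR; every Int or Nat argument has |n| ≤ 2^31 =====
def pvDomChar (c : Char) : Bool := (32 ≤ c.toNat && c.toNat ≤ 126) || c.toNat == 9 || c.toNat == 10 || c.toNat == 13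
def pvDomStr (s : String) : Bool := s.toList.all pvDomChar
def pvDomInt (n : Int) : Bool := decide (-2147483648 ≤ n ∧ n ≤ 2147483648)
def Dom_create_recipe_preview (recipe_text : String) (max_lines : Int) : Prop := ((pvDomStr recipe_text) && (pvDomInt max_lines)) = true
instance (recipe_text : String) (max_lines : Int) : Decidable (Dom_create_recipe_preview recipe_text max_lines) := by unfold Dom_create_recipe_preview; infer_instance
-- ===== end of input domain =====

-- B replaces A's line-count loop (with its skip/truncate bookkeeping) by a slice of the split
-- lines plus one truncation test; objective: simpler. Return-value equivalence only (no mutation).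

-- ===== PORT A =====
-- the 'for line in lines' loop of A, state = (preview_lines, line_count)
def pvGoA (m : Int) : List (List Char) → List (List Char) → Int → List (List Char)
  | [], acc, _ => acc
  | l :: ls, acc, cnt =>
    if m ≤ cnt then acc ++ ["...".toList]
    else if acc = [] ∧ PySem.Chars.strip l = [] then pvGoA m ls acc cnt
    else pvGoA m ls (acc ++ [l]) (cnt + 1)

def create_recipe_preview (recipe_text : String) (max_lines : Int) : String :=
  if recipe_text = "" then ""
  else
    let lines := PySem.Chars.splitOn (PySem.Chars.strip recipe_text.toList) "\n".toList
    String.ofList (PySem.Chars.join "\n".toList (pvGoA max_lines lines [] 0))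

-- ===== PORT B =====
def create_recipe_preview_alt (recipe_text : String) (max_lines : Int) : String :=
  let stripped := PySem.Chars.strip recipe_text.toList
  if stripped = [] then ""
  else
    let content := PySem.Chars.splitOn stripped "\n".toList
    let preview := PySem.List.slice content none (some (max max_lines 0))
    let preview := if max_lines < (content.length : Int) then preview ++ ["...".toList] else preview
    String.ofList (PySem.Chars.join "\n".toList preview)

-- ===== PRECONDITION & SPEC =====
-- On whitespace-only non-empty recipe_text with max_lines ≤ 0, A returns "..." (a truncation
-- marker although there is no content at all), while B returns "" as it does for every other
-- whitespace-only text; the empty preview is the intended value.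
def D_create_recipe_preview (recipe_text : String) (max_lines : Int) : Prop :=
  recipe_text ≠ "" ∧ recipe_text.toList.all PySem.Chars.isspace = true ∧ max_lines ≤ 0
instance (recipe_text : String) (max_lines : Int) : Decidable (D_create_recipe_preview recipe_text max_lines) := by unfold D_create_recipe_preview; infer_instance

def Spec_create_recipe_preview (recipe_text : String) (max_lines : Int) (out : String) : Prop := ¬ D_create_recipe_preview recipe_text max_lines → out = create_recipe_preview_alt recipe_text max_lines
instance (recipe_text : String) (max_lines : Int) (out : String) : Decidable (Spec_create_recipe_preview recipe_text max_lines out) := by unfold Spec_create_recipe_preview; infer_instance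

def pvDiffWitness_create_recipe_preview : String × Int := (" ", 0)
def pvDiffWitnessOut_create_recipe_preview : String × String := ("...", "")

-- ===== CLAIM (what is proved, stated in full; the proofs are below) =====
def Claim_unchanged_create_recipe_preview : Prop := ∀ (recipe_text : String) (max_lines : Int), Dom_create_recipe_preview recipe_text max_lines → Spec_create_recipe_preview recipe_text max_lines (create_recipe_preview recipe_text max_lines)
def Claim_changed_create_recipe_preview : Prop := Dom_create_recipe_preview (pvDiffWitness_create_recipe_preview.1) (pvDiffWitness_create_recipe_preview.2) ∧ D_create_recipe_preview (pvDiffWitness_create_recipe_preview.1) (pvDiffWitness_create_recipe_preview.2) ∧ create_recipe_preview (pvDiffWitness_create_recipe_preview.1) (pvDiffWitness_create_recipe_preview.2) = pvDiffWitnessOut_create_recipe_preview.1 ∧ create_recipe_preview_alt (pvDiffWitness_create_recipe_preview.1) (pvDiffWitness_create_recipe_preview.2) = pvDiffWitnessOut_create_recipe_preview.2 ∧ pvDiffWitnessOut_create_recipe_preview.1 ≠ pvDiffWitnessOut_create_recipe_preview.2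
def Claim_exact_create_recipe_preview : Prop := ∀ (recipe_text : String) (max_lines : Int), Dom_create_recipe_preview recipe_text max_lines → D_create_recipe_preview recipe_text max_lines → create_recipe_preview recipe_text max_lines ≠ create_recipe_preview_alt recipe_text max_lines

-- ===== LEMMAS AND PROOFS =====

-- a simple structural description of s.split("\n")
def pvConsHead (c : Char) : List (List Char) → List (List Char)
  | [] => [[c]]
  | l :: ls => (c :: l) :: ls

def pvSplit : List Char → List (List Char)
  | [] => [[]]
  | c :: r => if c = '\n' then [] :: pvSplit r else pvConsHead c (pvSplit r)

theorem pvSplit_ne_nil (l : List Char) : pvSplit l ≠ [] := by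
  cases l with
  | nil => simp [pvSplit]
  | cons c r =>
    simp only [pvSplit]
    split
    · simp
    · cases h : pvSplit r <;> simp [pvConsHead]

def pvPrep (p : List Char) : List (List Char) → List (List Char)
  | [] => [p]
  | l :: ls => (p ++ l) :: ls

theorem pvGo_eq (fuel : Nat) (l cur : List Char) (acc : List (List Char))
    (h : l.length < fuel) :
    PySem.Chars.splitOn.go "\n".toList fuel l cur acc
      = acc.reverse ++ pvPrep cur.reverse (pvSplit l) := by
  induction fuel generalizing l cur acc with
  | zero => omega
  | succ f ih =>
    cases l with
    | nil =>
      simp [PySem.Chars.splitOn.go, pvSplit, pvPrep]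
    | cons c rest =>
      have hr : rest.length < f := by simpa using h
      by_cases hc : c = '\n'
      · subst hc
        rw [show PySem.Chars.splitOn.go "\n".toList (f+1) ('\n' :: rest) cur acc
              = PySem.Chars.splitOn.go "\n".toList f (List.drop "\n".toList.length ('\n' :: rest)) [] (cur.reverse :: acc) by
          simp [PySem.Chars.splitOn.go]]
        rw [ih _ _ _ (by simpa using hr)]
        obtain ⟨r0, rs, hsp⟩ : ∃ r0 rs, pvSplit rest = r0 :: rs := by
          cases h : pvSplit rest with
          | nil => exact absurd h (pvSplit_ne_nil rest)
          | cons a b => exact ⟨a, b, rfl⟩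
        simp [pvSplit, hsp, pvPrep]
      · rw [show PySem.Chars.splitOn.go "\n".toList (f+1) (c :: rest) cur acc
              = PySem.Chars.splitOn.go "\n".toList f rest (c :: cur) acc by
          simp [PySem.Chars.splitOn.go]
          exact fun h => absurd h.symm hc]
        rw [ih _ _ _ hr]
        obtain ⟨r0, rs, hsp⟩ : ∃ r0 rs, pvSplit rest = r0 :: rs := by
          cases h : pvSplit rest with
          | nil => exact absurd h (pvSplit_ne_nil rest)
          | cons a b => exact ⟨a, b, rfl⟩
        simp [pvSplit, hc, hsp, pvPrep, pvConsHead]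

theorem pvSplitOn_eq (s : List Char) :
    PySem.Chars.splitOn s "\n".toList = pvSplit s := by
  rw [show PySem.Chars.splitOn s "\n".toList
        = PySem.Chars.splitOn.go "\n".toList (s.length + 1) s [] [] from rfl]
  rw [pvGo_eq _ _ _ _ (by omega)]
  obtain ⟨r0, rs, hsp⟩ : ∃ r0 rs, pvSplit s = r0 :: rs := by
    cases h : pvSplit s with
    | nil => exact absurd h (pvSplit_ne_nil s)
    | cons a b => exact ⟨a, b, rfl⟩
  simp [hsp, pvPrep]

-- strip is empty iff everything is whitespace
theorem pvStrip_eq_nil_iff (l : List Char) :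
    PySem.Chars.strip l = [] ↔ ∀ c ∈ l, PySem.Chars.isspace c = true := by
  unfold PySem.Chars.strip PySem.Chars.rstrip PySem.Chars.lstrip
  constructor
  · intro h c hc
    have h1 : ∀ c ∈ (List.dropWhile PySem.Chars.isspace l).reverse, PySem.Chars.isspace c = true := by
      have := (List.dropWhile_eq_nil_iff (l := (List.dropWhile PySem.Chars.isspace l).reverse)
        (p := PySem.Chars.isspace)).mp (by simpa using h)
      simpa using this
    have h2 : ∀ c ∈ List.dropWhile PySem.Chars.isspace l, PySem.Chars.isspace c = true := by
      intro c hc; exact h1 c (by simpa using hc)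
    have hmem : c ∈ List.takeWhile PySem.Chars.isspace l ++ List.dropWhile PySem.Chars.isspace l := by
      rw [List.takeWhile_append_dropWhile]; exact hc
    rcases List.mem_append.mp hmem with h3 | h3
    · exact List.mem_takeWhile_imp h3
    · exact h2 c h3
  · intro h
    have : List.dropWhile PySem.Chars.isspace l = [] :=
      List.dropWhile_eq_nil_iff.mpr (fun c hc => h c hc)
    simp [this]

-- the head of a non-empty strip is not whitespace
theorem pvStrip_head_not_space (l : List Char) (c : Char) (r : List Char)
    (h : PySem.Chars.strip l = c :: r) : PySem.Chars.isspace c = false := by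
  unfold PySem.Chars.strip PySem.Chars.rstrip PySem.Chars.lstrip at h
  have hsuff : (List.dropWhile PySem.Chars.isspace (List.dropWhile PySem.Chars.isspace l).reverse)
      <:+ (List.dropWhile PySem.Chars.isspace l).reverse := List.dropWhile_suffix _
  have hpre : (c :: r) <+: List.dropWhile PySem.Chars.isspace l := by
    have := List.reverse_prefix.mpr hsuff
    rw [h] at this
    simpa using this
  obtain ⟨t, ht⟩ := hpre
  have hy : List.dropWhile PySem.Chars.isspace l = c :: (r ++ t) := by rw [← ht]; simp
  have hne : List.dropWhile PySem.Chars.isspace l ≠ [] := by rw [hy]; simp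
  have := List.head_dropWhile_not PySem.Chars.isspace hne
  simpa [hy] using this

-- A's loop once the accumulator is non-empty
def pvSpine : List (List Char) → Int → List (List Char)
  | [], _ => []
  | l :: ls, r => if r ≤ 0 then ["...".toList] else l :: pvSpine ls (r - 1)

theorem pvGoA_acc_ne (m : Int) (ls : List (List Char)) :
    ∀ acc cnt, acc ≠ [] → pvGoA m ls acc cnt = acc ++ pvSpine ls (m - cnt) := by
  induction ls with
  | nil => intro acc cnt _; simp [pvGoA, pvSpine]
  | cons l ls ih =>
    intro acc cnt hacc
    simp only [pvGoA, pvSpine]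
    by_cases hm : m ≤ cnt
    · simp [hm, show m - cnt ≤ 0 by omega]
    · have h1 : ¬ (acc = [] ∧ PySem.Chars.strip l = []) := fun h => hacc h.1
      simp only [if_neg hm, if_neg h1]
      rw [ih (acc ++ [l]) (cnt + 1) (by simp), if_neg (show ¬ (m - cnt ≤ 0) by omega)]
      simp [show m - (cnt + 1) = m - cnt - 1 by omega]

theorem pvGoA_start (m : Int) (l0 : List Char) (ls : List (List Char))
    (h : PySem.Chars.strip l0 ≠ []) :
    pvGoA m (l0 :: ls) [] 0 = pvSpine (l0 :: ls) m := by
  simp only [pvGoA, pvSpine]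
  by_cases hm : m ≤ 0
  · simp [hm]
  · have h1 : ¬ (True ∧ PySem.Chars.strip l0 = []) := fun hx => h hx.2
    rw [if_neg hm, if_neg h1, pvGoA_acc_ne m ls ([] ++ [l0]) (0 + 1) (by simp)]
    simp [hm]

theorem pvSpine_eq_take (ls : List (List Char)) (r : Int) (h : ls ≠ []) :
    pvSpine ls r
      = ls.take r.toNat ++ (if r < (ls.length : Int) then ["...".toList] else []) := by
  induction ls generalizing r with
  | nil => exact absurd rfl h
  | cons l ls ih =>
    simp only [pvSpine]
    by_cases hr : r ≤ 0
    · have h0 : r.toNat = 0 := by omega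
      have hlt : r < ((l :: ls).length : Int) := by
        rw [List.length_cons]; push_cast; omega
      rw [if_pos hr, h0, List.take_zero, if_pos hlt, List.nil_append]
    · have hnat : r.toNat = (r - 1).toNat + 1 := by omega
      cases ls with
      | nil =>
        rw [if_neg hr]
        have h1 : ¬ r < ((l :: ([] : List (List Char))).length : Int) := by
          simp; omega
        rw [if_neg h1]
        have h2 : List.take r.toNat [l] = [l] := List.take_of_length_le (by simp; omega)
        simp [pvSpine, h2]
      | cons l2 ls2 =>
        rw [if_neg hr, ih (r - 1) (by simp)]
        by_cases hc : r - 1 < ((l2 :: ls2).length : Int)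
        · rw [if_pos hc, if_pos (by rw [List.length_cons]; push_cast at hc ⊢; omega :
            r < ((l :: l2 :: ls2).length : Int))]
          rw [hnat, List.take_succ_cons]; simp
        · rw [if_neg hc, if_neg (by rw [List.length_cons]; push_cast at hc ⊢; omega :
            ¬ r < ((l :: l2 :: ls2).length : Int))]
          rw [hnat, List.take_succ_cons]; simp

-- B's slice is the same take
theorem pvSlice_eq_take (content : List (List Char)) (m : Int) :
    PySem.List.slice content none (some (max m 0)) = content.take m.toNat := by
  rw [PySem.List.slice_to _ (by omega)]
  congr 1
  omega

-- ===== VERDICT (by name: the statement is the Claim_ definition above) =====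
theorem create_recipe_preview_spec : Claim_unchanged_create_recipe_preview := by
  intro t m _ hnd
  unfold create_recipe_preview create_recipe_preview_alt
  by_cases ht : t = ""
  · subst ht
    simp [PySem.Chars.strip, PySem.Chars.lstrip, PySem.Chars.rstrip]
  · rw [if_neg ht]
    cases hs : PySem.Chars.strip t.toList with
    | nil =>
      -- whitespace-only: ¬D_ forces 0 < m, A's loop skips the single empty line
      have hall : ∀ c ∈ t.toList, PySem.Chars.isspace c = true := (pvStrip_eq_nil_iff _).mp hs
      have hm : ¬ m ≤ 0 := by
        intro hm
        exact hnd ⟨ht, by simpa [List.all_eq_true] using hall, hm⟩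
      rw [if_pos rfl, pvSplitOn_eq]
      simp only [pvSplit]
      rw [show pvGoA m [[]] [] 0 = [] by
        simp [pvGoA, if_neg (show ¬ m ≤ 0 from hm), PySem.Chars.strip, PySem.Chars.lstrip,
          PySem.Chars.rstrip]]
      simp [PySem.Chars.join, List.intercalate]
    | cons c r =>
      rw [if_neg (by simp)]
      rw [pvSplitOn_eq]
      have hcs : PySem.Chars.isspace c = false := pvStrip_head_not_space t.toList c r hs
      have hcn : c ≠ '\n' := by
        intro h; subst h; exact absurd hcs (by decide)
      obtain ⟨h0, rest, hsp⟩ : ∃ h0 rest, pvSplit r = h0 :: rest := by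
        cases h : pvSplit r with
        | nil => exact absurd h (pvSplit_ne_nil r)
        | cons a b => exact ⟨a, b, rfl⟩
      have hlines : pvSplit (c :: r) = (c :: h0) :: rest := by
        simp [pvSplit, hcn, hsp, pvConsHead]
      rw [hlines]
      have hl0 : PySem.Chars.strip (c :: h0) ≠ [] := by
        intro h
        have := (pvStrip_eq_nil_iff _).mp h c (by simp)
        rw [hcs] at this; exact absurd this (by decide)
      dsimp only
      rw [pvGoA_start m _ _ hl0, pvSpine_eq_take _ _ (by simp)]
      rw [pvSlice_eq_take]
      split_ifs <;> simp

theorem create_recipe_preview_changed : Claim_changed_create_recipe_preview := by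
  unfold Claim_changed_create_recipe_preview; decide

theorem create_recipe_preview_tight : Claim_exact_create_recipe_preview := by
  intro t m _ hd
  obtain ⟨ht, hall, hm⟩ := hd
  have hs : PySem.Chars.strip t.toList = [] :=
    (pvStrip_eq_nil_iff _).mpr (by simpa [List.all_eq_true] using hall)
  unfold create_recipe_preview create_recipe_preview_alt
  rw [if_neg ht]
  simp only [hs]
  rw [pvSplitOn_eq]
  simp only [pvSplit]
  rw [show pvGoA m [[]] [] 0 = ["...".toList] by simp [pvGoA, hm]]
  simp [PySem.Chars.join]
  intro h
  simp [List.intercalate] at h
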